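-- pv_equiv track=rewrite | github.com/techthiyanes/primeqa | oneqa/mrc/processors/preprocessors/default.py | _generate_previous_spans_per_example
-- ===== SOURCE A (Python) =====
-- import itertools
-- from typing import List, Iterable, Tuple, Any, Dict
--
-- def _generate_previous_spans_per_example(example_idx: List[int], sample_mapping: List[int]) -> Iterable[int]:
--     group_start_idx = 0
--     for _, group in itertools.groupby(example_idx):
--         group_len = None
--         for group_len, _ in enumerate(group, 1):
--             pass
--         if group_len is None:  # this should never be triggered
--             raise ValueError("Unexpected group length None")
--         yield from itertools.repeat(sample_mapping[group_start_idx], group_len)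
--         group_start_idx += group_len
-- ===== SOURCE B (Python) =====
-- def _generate_previous_spans_per_example(example_idx, sample_mapping):
--     # Single flat pass: track the current group's start index instead of
--     # counting group lengths and repeating.
--     prev = object()  # unique sentinel: first element always opens a group
--     start = 0
--     for i, e in enumerate(example_idx):
--         if e != prev:
--             start = i
--             prev = e
--         yield sample_mapping[start]
-- ===== Notes on version B (the rewrite author's own statement) =====
-- stated objective: simpler
-- what changed: Replaces itertools.groupby with an inner enumerate-based length count and itertools.repeat by one flat pass over enumerate(example_idx) that tracks the current group's start index and yields sample_mapping[start] per element.
import Mathlib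
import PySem

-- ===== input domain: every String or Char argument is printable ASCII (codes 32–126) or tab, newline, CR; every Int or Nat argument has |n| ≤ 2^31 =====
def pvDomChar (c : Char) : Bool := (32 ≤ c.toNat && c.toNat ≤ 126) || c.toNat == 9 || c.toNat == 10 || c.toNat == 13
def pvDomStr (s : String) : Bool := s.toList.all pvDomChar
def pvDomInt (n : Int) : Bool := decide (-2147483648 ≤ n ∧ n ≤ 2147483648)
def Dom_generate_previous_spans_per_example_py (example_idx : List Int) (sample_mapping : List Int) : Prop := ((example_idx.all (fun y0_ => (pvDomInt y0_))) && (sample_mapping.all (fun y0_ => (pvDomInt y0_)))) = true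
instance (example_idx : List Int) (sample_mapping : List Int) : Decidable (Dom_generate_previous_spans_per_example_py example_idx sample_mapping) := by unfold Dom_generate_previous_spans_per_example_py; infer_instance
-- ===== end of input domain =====

-- B replaces A's groupby + per-group length count + repeat by one flat pass tracking the
-- current group's start index (objective: simpler). Equivalence is about the yielded sequence.

-- ===== PORT A =====
-- itertools.groupby step: length of the leading run equal to x, and the remainder.
def pvRunSplit (x : Int) : List Int → Nat × List Int
  | [] => (0, [])
  | y :: ys => if y = x then ((pvRunSplit x ys).1 + 1, (pvRunSplit x ys).2) else (0, y :: ys)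

theorem pvRunSplit_len (x : Int) (l : List Int) : (pvRunSplit x l).2.length ≤ l.length := by
  induction l with
  | nil => simp [pvRunSplit]
  | cons y ys ih =>
    by_cases h : y = x
    · simp only [pvRunSplit, if_pos h, List.length_cons]; omega
    · simp [pvRunSplit, h]

-- the outer loop over groups, carrying group_start_idx
def pvGenAux (l : List Int) (sm : List Int) (start : Int) : List Int :=
  match l with
  | [] => []
  | x :: xs =>
      let nr := pvRunSplit x xs
      List.replicate (nr.1 + 1) (PySem.List.pyGetD sm start 0)
        ++ pvGenAux nr.2 sm (start + nr.1 + 1)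
termination_by l.length
decreasing_by
  simpa using Nat.lt_succ_of_le (pvRunSplit_len x xs)

def generate_previous_spans_per_example_py (example_idx : List Int) (sample_mapping : List Int) : List Int :=
  pvGenAux example_idx sample_mapping 0

-- ===== PORT B =====
def pvStepB (sm : List Int) (st : Option Int × Int × List Int) (p : Int × Int) :
    Option Int × Int × List Int :=
  -- if e != prev: start = i; prev = e;  then yield sample_mapping[start]
  let s2 : Option Int × Int := if st.1 = some p.2 then (st.1, st.2.1) else (some p.2, p.1)
  (s2.1, s2.2, st.2.2 ++ [PySem.List.pyGetD sm s2.2 0])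

def generate_previous_spans_per_example_py_alt (example_idx : List Int) (sample_mapping : List Int) : List Int :=
  ((PySem.List.enumerate example_idx 0).foldl (pvStepB sample_mapping) (none, 0, [])).2.2

-- ===== PRECONDITION & SPEC =====
-- Pre_ excludes exactly the inputs where A raises IndexError: some group-start index
-- of example_idx is out of range for sample_mapping.
def Pre_generate_previous_spans_per_example_py (example_idx : List Int) (sample_mapping : List Int) : Prop :=
  ((List.range example_idx.length).all (fun i =>
    !(i == 0 || example_idx.getD i 0 != example_idx.getD (i - 1) 0)
      || decide (i < sample_mapping.length))) = true
instance (example_idx : List Int) (sample_mapping : List Int) : Decidable (Pre_generate_previous_spans_per_example_py example_idx sample_mapping) := by unfold Pre_generate_previous_spans_per_example_py; infer_instance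

def pvWitness_generate_previous_spans_per_example_py : List Int × List Int := ([1, 1, 2], [5, 6, 7])

def Spec_generate_previous_spans_per_example_py (example_idx : List Int) (sample_mapping : List Int) (out : List Int) : Prop := out = generate_previous_spans_per_example_py_alt example_idx sample_mapping
instance (example_idx : List Int) (sample_mapping : List Int) (out : List Int) : Decidable (Spec_generate_previous_spans_per_example_py example_idx sample_mapping out) := by unfold Spec_generate_previous_spans_per_example_py; infer_instance

-- ===== CLAIM (what is proved, stated in full; the proofs are below) =====
def Claim_equal_generate_previous_spans_per_example_py : Prop := ∀ (example_idx : List Int) (sample_mapping : List Int), Dom_generate_previous_spans_per_example_py example_idx sample_mapping → Pre_generate_previous_spans_per_example_py example_idx sample_mapping → Spec_generate_previous_spans_per_example_py example_idx sample_mapping (generate_previous_spans_per_example_py example_idx sample_mapping)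

-- ===== LEMMAS AND PROOFS =====

-- Inside a run: B's fold from state (some p, s, acc) over the enumeration of l starting at
-- index k emits sample_mapping[s] for the rest of p's run, then behaves like A's outer loop.
theorem pvKey (l : List Int) : ∀ (sm : List Int) (p s k : Int) (acc : List Int),
    ((PySem.List.enumerate l k).foldl (pvStepB sm) (some p, s, acc)).2.2
      = acc ++ List.replicate (pvRunSplit p l).1 (PySem.List.pyGetD sm s 0)
            ++ pvGenAux (pvRunSplit p l).2 sm (k + (pvRunSplit p l).1) := by
  induction l with
  | nil => intro sm p s k acc; simp [PySem.List.enumerate_nil, pvRunSplit, pvGenAux]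
  | cons x xs ih =>
    intro sm p s k acc
    rw [PySem.List.enumerate_cons]
    by_cases h : x = p
    · subst h
      have hstep : pvStepB sm (some x, s, acc) (k, x)
          = (some x, s, acc ++ [PySem.List.pyGetD sm s 0]) := by
        simp [pvStepB]
      have hrs : pvRunSplit x (x :: xs) = ((pvRunSplit x xs).1 + 1, (pvRunSplit x xs).2) := by
        simp [pvRunSplit]
      rw [List.foldl_cons, hstep, ih, hrs]
      have harg : k + 1 + ((pvRunSplit x xs).1 : Int)
          = k + ((((pvRunSplit x xs).1 + 1 : Nat)) : Int) := by push_cast; ring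
      rw [harg]
      simp [List.replicate_succ]
    · have hstep : pvStepB sm (some p, s, acc) (k, x)
          = (some x, k, acc ++ [PySem.List.pyGetD sm k 0]) := by
        simp [pvStepB, Ne.symm h]
      have hrs : pvRunSplit p (x :: xs) = (0, x :: xs) := by
        simp [pvRunSplit, h]
      rw [List.foldl_cons, hstep, ih, hrs]
      have hgen : pvGenAux (x :: xs) sm k
          = List.replicate ((pvRunSplit x xs).1 + 1) (PySem.List.pyGetD sm k 0)
              ++ pvGenAux (pvRunSplit x xs).2 sm (k + (pvRunSplit x xs).1 + 1) := by
        rw [pvGenAux]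
      simp only [List.replicate, Nat.cast_zero, add_zero]
      rw [hgen]
      have harg : k + 1 + ((pvRunSplit x xs).1 : Int) = k + (pvRunSplit x xs).1 + 1 := by ring
      rw [harg]
      simp [List.replicate_succ]

theorem pvMain (example_idx sample_mapping : List Int) :
    generate_previous_spans_per_example_py example_idx sample_mapping
      = generate_previous_spans_per_example_py_alt example_idx sample_mapping := by
  unfold generate_previous_spans_per_example_py generate_previous_spans_per_example_py_alt
  cases example_idx with
  | nil => simp [PySem.List.enumerate_nil, pvGenAux]
  | cons x xs =>
    rw [PySem.List.enumerate_cons]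
    have hstep : pvStepB sample_mapping (none, 0, []) (0, x)
        = (some x, 0, [PySem.List.pyGetD sample_mapping 0 0]) := by
      simp [pvStepB]
    have hgen : pvGenAux (x :: xs) sample_mapping 0
        = List.replicate ((pvRunSplit x xs).1 + 1) (PySem.List.pyGetD sample_mapping 0 0)
            ++ pvGenAux (pvRunSplit x xs).2 sample_mapping (0 + (pvRunSplit x xs).1 + 1) := by
      rw [pvGenAux]
    rw [List.foldl_cons, hstep, pvKey, hgen]
    have harg : (0 : Int) + 1 + ((pvRunSplit x xs).1 : Int)
        = 0 + (pvRunSplit x xs).1 + 1 := by ring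
    rw [harg]
    simp [List.replicate_succ]

-- ===== VERDICT (by name: the statement is the Claim_ definition above) =====
theorem generate_previous_spans_per_example_py_spec : Claim_equal_generate_previous_spans_per_example_py := by
  intro example_idx sample_mapping _ _
  exact pvMain example_idx sample_mapping
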